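-- pv_equiv track=rewrite | github.com/math707/Analyse-et-optimisation-des-correspondances-intermodales-en-Valais_model | singletrack_v2.py | _compute_trip_times_B_to_A
-- ===== SOURCE A (Python) =====
-- def _compute_trip_times_B_to_A(
--     stops: list[str],
--     run_times_down: list[int],
--     dwell_choice: dict[str, int],
--     depB: int,
--     terminus_A: str,
--     terminus_B: str,
-- ) -> tuple[dict[str, int], dict[str, int], int]:
--     """
--     Construit horaires DOWN: depB à B -> ... -> A (arr/dep).
--     Convention:
--       - B : arr=dep=depB (point)
--       - chaque stop intermédiaire s: dep = arr + dwell_choice[s]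
--       - A : arrA est retourné, depA_down non utilisé (on met dep[A]=arr[A])
--     """
--     stops_rev = list(reversed(stops))
--     # down run_times est aligné sur (B->...->A) donc longueur len(stops)-1
--     B = terminus_B
--     arr = {B: int(depB)}
--     dep = {B: int(depB)}
--     for k in range(len(stops_rev) - 1):
--         s0 = stops_rev[k]
--         s1 = stops_rev[k+1]
--         # segment k correspond au tronçon s0->s1 en sens DOWN
--         t = int(dep[s0]) + int(run_times_down[k])
--         arr[s1] = t
--         if s1 == terminus_A:
--             dep[s1] = t
--         else:
--             dep[s1] = t + int(dwell_choice.get(s1, 0))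
--     return arr, dep, int(arr[terminus_A])
-- ===== SOURCE B (Python) =====
-- from itertools import accumulate
--
--
-- def _compute_trip_times_B_to_A(
--     stops: list[str],
--     run_times_down: list[int],
--     dwell_choice: dict[str, int],
--     depB: int,
--     terminus_A: str,
--     terminus_B: str,
-- ) -> tuple[dict[str, int], dict[str, int], int]:
--     # Two-phase rewrite: first a prefix-sum table of arrival times via
--     # itertools.accumulate, then a separate pass materialising the dicts.
--     stops_rev = stops[::-1]
--     # per-segment dwell of the departing stop (segment 0 departs the terminus, no dwell)
--     ws = [0] + [
--         0 if s == terminus_A else int(dwell_choice.get(s, 0))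
--         for s in stops_rev[1:-1]
--     ]
--     incs = [w + int(r) for w, r in zip(ws, run_times_down)]
--     arrivals = list(accumulate(incs, initial=int(depB)))
--     arr = {terminus_B: int(depB)}
--     dep = {terminus_B: int(depB)}
--     for s, a in zip(stops_rev[1:], arrivals[1:]):
--         arr[s] = a
--         dep[s] = a if s == terminus_A else a + int(dwell_choice.get(s, 0))
--     return arr, dep, int(arr[terminus_A])
-- ===== Notes on version B (the rewrite author's own statement) =====
-- stated objective: alternative
-- what changed: A computes each arrival inside one indexed loop by re-reading the dep dict it is building; B first builds a prefix-sum table of arrivals with itertools.accumulate over per-segment increments and then materialises the arr/dep dicts in a separate zip pass.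
import Mathlib
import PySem

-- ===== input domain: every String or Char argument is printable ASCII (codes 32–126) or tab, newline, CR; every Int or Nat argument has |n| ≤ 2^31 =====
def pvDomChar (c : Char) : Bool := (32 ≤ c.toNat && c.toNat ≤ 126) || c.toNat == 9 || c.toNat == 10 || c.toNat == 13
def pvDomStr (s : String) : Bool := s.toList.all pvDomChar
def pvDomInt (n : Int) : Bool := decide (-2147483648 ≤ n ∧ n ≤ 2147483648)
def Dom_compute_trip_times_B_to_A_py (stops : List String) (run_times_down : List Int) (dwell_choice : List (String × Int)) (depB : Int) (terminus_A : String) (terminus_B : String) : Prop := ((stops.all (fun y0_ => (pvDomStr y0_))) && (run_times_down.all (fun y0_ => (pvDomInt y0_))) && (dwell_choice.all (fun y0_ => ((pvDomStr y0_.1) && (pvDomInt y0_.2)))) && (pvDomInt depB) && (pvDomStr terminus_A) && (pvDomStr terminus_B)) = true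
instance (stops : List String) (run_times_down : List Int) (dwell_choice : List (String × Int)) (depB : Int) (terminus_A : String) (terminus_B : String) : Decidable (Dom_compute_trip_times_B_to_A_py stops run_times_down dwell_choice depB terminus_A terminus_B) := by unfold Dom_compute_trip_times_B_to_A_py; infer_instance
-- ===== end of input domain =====

-- B separates computation from materialisation: a prefix-sum (accumulate) table of
-- arrival times is built first, then one pass fills the two dicts (objective: alternative).

-- ===== PORT A =====
-- loop body of A's `for k in range(len(stops_rev) - 1)` (extracted as a named helper)
def pvBodyA (dc : PySem.Dict String Int) (tA : String) (stops_rev : List String)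
    (rts : List Int) (st : PySem.Dict String Int × PySem.Dict String Int) (k : Int) :
    PySem.Dict String Int × PySem.Dict String Int :=
  let s0 := PySem.List.pyGetD stops_rev k ""
  let s1 := PySem.List.pyGetD stops_rev (k + 1) ""
  let t := st.2.getD s0 0 + PySem.List.pyGetD rts k 0
  (st.1.insert s1 t,
   if s1 = tA then st.2.insert s1 t
   else st.2.insert s1 (t + dc.getD s1 0))

def compute_trip_times_B_to_A_py (stops : List String) (run_times_down : List Int) (dwell_choice : List (String × Int)) (depB : Int) (terminus_A : String) (terminus_B : String) : (List (String × Int)) × (List (String × Int)) × Int :=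
  let stops_rev := stops.reverse
  let dc := PySem.Dict.ofList dwell_choice
  let arr0 : PySem.Dict String Int := PySem.Dict.empty.insert terminus_B depB
  let dep0 : PySem.Dict String Int := PySem.Dict.empty.insert terminus_B depB
  let st := (PySem.List.pyRange 0 ((stops_rev.length : Int) - 1) 1).foldl
      (pvBodyA dc terminus_A stops_rev run_times_down) (arr0, dep0)
  (st.1.items, st.2.items, st.1.getD terminus_A 0)

-- ===== PORT B =====
def compute_trip_times_B_to_A_py_alt (stops : List String) (run_times_down : List Int) (dwell_choice : List (String × Int)) (depB : Int) (terminus_A : String) (terminus_B : String) : (List (String × Int)) × (List (String × Int)) × Int :=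
  let stops_rev := stops.reverse
  let dc := PySem.Dict.ofList dwell_choice
  let ws := 0 :: (PySem.List.slice stops_rev (some 1) (some ((stops_rev.length : Int) - 1))).map
      (fun s => if s = terminus_A then 0 else dc.getD s 0)
  let incs := List.zipWith (fun w r => w + r) ws run_times_down
  let arrivals := List.scanl (fun a i => a + i) depB incs
  let arr0 : PySem.Dict String Int := PySem.Dict.empty.insert terminus_B depB
  let dep0 : PySem.Dict String Int := PySem.Dict.empty.insert terminus_B depB
  let st := ((PySem.List.slice stops_rev (some 1) none).zip arrivals.tail).foldl
      (fun (st : PySem.Dict String Int × PySem.Dict String Int) p =>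
        (st.1.insert p.1 p.2,
         st.2.insert p.1 (if p.1 = terminus_A then p.2 else p.2 + dc.getD p.1 0)))
      (arr0, dep0)
  (st.1.items, st.2.items, st.1.getD terminus_A 0)

-- ===== PRECONDITION & SPEC =====
-- Pre_ excludes exactly the inputs on which the Python A raises: a KeyError when the
-- last stop is not terminus_B or when terminus_A never gets an arrival entry, and an
-- IndexError when run_times_down is shorter than len(stops)-1.
def Pre_compute_trip_times_B_to_A_py (stops : List String) (run_times_down : List Int) (dwell_choice : List (String × Int)) (depB : Int) (terminus_A : String) (terminus_B : String) : Prop :=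
  (2 ≤ stops.length → stops.getLast? = some terminus_B) ∧
  stops.length ≤ run_times_down.length + 1 ∧
  (terminus_A = terminus_B ∨ terminus_A ∈ stops.dropLast)
instance (stops : List String) (run_times_down : List Int) (dwell_choice : List (String × Int)) (depB : Int) (terminus_A : String) (terminus_B : String) : Decidable (Pre_compute_trip_times_B_to_A_py stops run_times_down dwell_choice depB terminus_A terminus_B) := by unfold Pre_compute_trip_times_B_to_A_py; infer_instance

def pvWitness_compute_trip_times_B_to_A_py : List String × List Int × (List (String × Int)) × Int × String × String :=
  (["a", "b"], [3], [("a", 1)], 5, "a", "b")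

def Spec_compute_trip_times_B_to_A_py (stops : List String) (run_times_down : List Int) (dwell_choice : List (String × Int)) (depB : Int) (terminus_A : String) (terminus_B : String) (out : (List (String × Int)) × (List (String × Int)) × Int) : Prop := out = compute_trip_times_B_to_A_py_alt stops run_times_down dwell_choice depB terminus_A terminus_B
instance (stops : List String) (run_times_down : List Int) (dwell_choice : List (String × Int)) (depB : Int) (terminus_A : String) (terminus_B : String) (out : (List (String × Int)) × (List (String × Int)) × Int) : Decidable (Spec_compute_trip_times_B_to_A_py stops run_times_down dwell_choice depB terminus_A terminus_B out) := by unfold Spec_compute_trip_times_B_to_A_py; infer_instance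

-- ===== CLAIM (what is proved, stated in full; the proofs are below) =====
def Claim_equal_compute_trip_times_B_to_A_py : Prop := ∀ (stops : List String) (run_times_down : List Int) (dwell_choice : List (String × Int)) (depB : Int) (terminus_A : String) (terminus_B : String), Dom_compute_trip_times_B_to_A_py stops run_times_down dwell_choice depB terminus_A terminus_B → Pre_compute_trip_times_B_to_A_py stops run_times_down dwell_choice depB terminus_A terminus_B → Spec_compute_trip_times_B_to_A_py stops run_times_down dwell_choice depB terminus_A terminus_B (compute_trip_times_B_to_A_py stops run_times_down dwell_choice depB terminus_A terminus_B)

-- ===== LEMMAS AND PROOFS =====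

-- the (stop, arrival) entries produced along the reversed route; d = departure time
-- from the previous stop
def pvChain (dc : PySem.Dict String Int) (tA : String) : List (String × Int) → Int → List (String × Int)
  | [], _ => []
  | (s, rt) :: tl, d =>
      (s, d + rt) :: pvChain dc tA tl (if s = tA then d + rt else d + rt + dc.getD s 0)

lemma pv_pyGetD_cons_succ {α : Type} (x : α) (xs : List α) (i : Int) (h : 0 ≤ i) (d : α) :
    PySem.List.pyGetD (x :: xs) (i + 1) d = PySem.List.pyGetD xs i d := by
  lift i to ℕ using h
  have e : ((i : Int) + 1) = ((i + 1 : ℕ) : Int) := by push_cast; ring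
  rw [e, PySem.List.pyGetD_natCast, PySem.List.pyGetD_natCast, List.getD_cons_succ]

-- A's indexed loop equals the pair of pvChain folds
lemma pv_loopA (dc : PySem.Dict String Int) (tA : String) :
    ∀ (rest : List String) (rts : List Int) (s0 : String)
      (arr dep : PySem.Dict String Int) (d : Int),
      dep.getD s0 0 = d → rest.length ≤ rts.length →
      (List.range rest.length).foldl
        (fun st (k : Nat) => pvBodyA dc tA (s0 :: rest) rts st (k : Int)) (arr, dep)
      = ((pvChain dc tA (rest.zip rts) d).foldl (fun a p => a.insert p.1 p.2) arr,
         (pvChain dc tA (rest.zip rts) d).foldl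
           (fun a p => a.insert p.1 (if p.1 = tA then p.2 else p.2 + dc.getD p.1 0)) dep) := by
  intro rest
  induction rest with
  | nil => intro rts s0 arr dep d _ _; simp [pvChain]
  | cons s1 rest ih =>
      intro rts s0 arr dep d hdep hlen
      cases rts with
      | nil => simp at hlen
      | cons r0 rtl =>
          simp only [List.length_cons, Nat.add_le_add_iff_right] at hlen
          rw [List.length_cons, List.range_succ_eq_map, List.foldl_cons, List.foldl_map]
          have h0 : pvBodyA dc tA (s0 :: s1 :: rest) (r0 :: rtl) (arr, dep) ((0 : Nat) : Int)
              = (arr.insert s1 (d + r0),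
                 dep.insert s1 (if s1 = tA then d + r0 else d + r0 + dc.getD s1 0)) := by
            simp only [pvBodyA, Nat.cast_zero, zero_add, PySem.List.pyGetD_zero_cons]
            have e1 : PySem.List.pyGetD (s0 :: s1 :: rest) (1 : Int) "" = s1 := by
              rw [show (1 : Int) = 0 + 1 by ring, pv_pyGetD_cons_succ _ _ 0 le_rfl,
                  PySem.List.pyGetD_zero_cons]
            have e2 : PySem.List.pyGetD (r0 :: rtl) ((0 : Nat) : Int) 0 = r0 := by
              rw [PySem.List.pyGetD_natCast]; rfl
            simp only [hdep]
            rw [e1]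
            split_ifs <;> rfl
          have hcongr : ∀ (st : PySem.Dict String Int × PySem.Dict String Int) (k : Nat),
              k ∈ List.range rest.length →
              pvBodyA dc tA (s0 :: s1 :: rest) (r0 :: rtl) st ((k.succ : Nat) : Int)
              = pvBodyA dc tA (s1 :: rest) rtl st ((k : Nat) : Int) := by
            intro st k _
            have e : ((k.succ : Nat) : Int) = ((k : Nat) : Int) + 1 := by push_cast; ring
            unfold pvBodyA
            rw [e, pv_pyGetD_cons_succ s0 (s1 :: rest) ((k : Nat) + 1 : Int) (by positivity) "",
                pv_pyGetD_cons_succ s0 (s1 :: rest) ((k : Nat) : Int) (by positivity) "",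
                pv_pyGetD_cons_succ r0 rtl ((k : Nat) : Int) (by positivity) 0]
          rw [PySem.List.foldl_congr_mem (List.range rest.length) _ _ _ hcongr, h0]
          rw [ih rtl s1 (arr.insert s1 (d + r0))
                (dep.insert s1 (if s1 = tA then d + r0 else d + r0 + dc.getD s1 0))
                (if s1 = tA then d + r0 else d + r0 + dc.getD s1 0)
                (PySem.Dict.getD_insert_self dep s1 (if s1 = tA then d + r0 else d + r0 + dc.getD s1 0) 0) hlen]
          simp only [List.zip_cons_cons, pvChain, List.foldl_cons]

lemma pv_zip_scanl_cons {α β γ : Type} (a : α) (l : List α) (f : β → γ → β) (b : β) (xs : List γ) :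
    (a :: l).zip (List.scanl f b xs) = (a, b) :: l.zip (List.scanl f b xs).tail := by
  cases xs <;> simp [List.scanl_cons, List.scanl_nil]

-- B's zip of stops with the accumulate table is exactly pvChain
lemma pv_chainB (dc : PySem.Dict String Int) (tA : String) :
    ∀ (rest : List String) (rts : List Int) (d wp : Int),
      rest.length ≤ rts.length →
      rest.zip ((List.scanl (fun a i => a + i) d
          (List.zipWith (fun w r => w + r)
            (wp :: rest.dropLast.map (fun s => if s = tA then 0 else dc.getD s 0)) rts)).tail)
      = pvChain dc tA (rest.zip rts) (d + wp) := by
  intro rest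
  induction rest with
  | nil => intro rts d wp _; simp [pvChain]
  | cons s1 rest ih =>
      intro rts d wp hlen
      cases rts with
      | nil => simp at hlen
      | cons r0 rtl =>
          simp only [List.length_cons, Nat.add_le_add_iff_right] at hlen
          cases rest with
          | nil =>
              simp [pvChain, List.scanl_cons, List.scanl_nil]
              ring
          | cons s2 rest' =>
              rw [show (s1 :: s2 :: rest').dropLast = s1 :: (s2 :: rest').dropLast from rfl]
              simp only [List.map_cons, List.zipWith_cons_cons]
              rw [List.scanl_cons, List.tail_cons, pv_zip_scanl_cons]
              simp only [pvChain, List.zip_cons_cons, List.cons.injEq, Prod.mk.injEq]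
              refine ⟨⟨trivial, by ring⟩, ?_⟩
              rw [ih rtl (d + (wp + r0)) (if s1 = tA then 0 else dc.getD s1 0) hlen]
              split_ifs with h <;> (congr 1; ring)

-- B's componentwise pair fold splits into two folds
lemma pv_foldl_pair (dc : PySem.Dict String Int) (tA : String) (l : List (String × Int))
    (b c : PySem.Dict String Int) :
    l.foldl (fun st p =>
        (st.1.insert p.1 p.2,
         st.2.insert p.1 (if p.1 = tA then p.2 else p.2 + dc.getD p.1 0))) (b, c)
    = (l.foldl (fun a p => a.insert p.1 p.2) b,
       l.foldl (fun a p => a.insert p.1 (if p.1 = tA then p.2 else p.2 + dc.getD p.1 0)) c) := by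
  induction l generalizing b c with
  | nil => rfl
  | cons x xs ih => simp [ih]

-- ===== VERDICT (by name: the statement is the Claim_ definition above) =====
theorem compute_trip_times_B_to_A_py_spec : Claim_equal_compute_trip_times_B_to_A_py := by
  intro stops rts dw depB tA tB _ hPre
  obtain ⟨h1, h2, h3⟩ := hPre
  unfold Spec_compute_trip_times_B_to_A_py
  unfold compute_trip_times_B_to_A_py compute_trip_times_B_to_A_py_alt
  dsimp only
  cases hsr : stops.reverse with
  | nil =>
      have : stops = [] := by simpa using congrArg List.reverse hsr
      subst this
      simp [PySem.List.pyRange_one_eq_nil (by norm_num : (-1 : Int) ≤ 0),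
            PySem.List.slice_from_one]
  | cons s0 rest =>
      have hlenstops : stops.length = rest.length + 1 := by
        rw [← List.length_reverse, hsr, List.length_cons]
      have hlen : rest.length ≤ rts.length := by omega
      have hcastlen : (((s0 :: rest).length : Int) - 1) = (rest.length : Int) := by
        simp
      rw [hcastlen]
      -- A side: pyRange → List.range fold
      rw [PySem.List.pyRange_one]
      have htonat : ((rest.length : Int) - 0).toNat = rest.length := by simp
      rw [htonat, List.foldl_map]
      simp only [zero_add]
      -- B side: slices
      rw [PySem.List.slice_from_one, List.tail_cons]
      have hslice : PySem.List.slice (s0 :: rest) (some 1) (some (rest.length : Int))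
          = rest.dropLast := by
        have : ((1 : Int)) = ((1 : ℕ) : Int) := by norm_num
        rw [this, PySem.List.slice_natCast]
        simp [List.dropLast_eq_take]
      rw [hslice, pv_foldl_pair (PySem.Dict.ofList dw) tA]
      cases rest with
      | nil => simp
      | cons s1 rest' =>
          have hs0 : s0 = tB := by
            have h2le : 2 ≤ stops.length := by
              simp only [List.length_cons] at hlenstops; omega
            have := h1 h2le
            rw [← List.head?_reverse, hsr, List.head?_cons] at this
            exact Option.some.inj this
          have hdep : (PySem.Dict.empty.insert tB depB).getD s0 0 = depB := by
            rw [hs0, PySem.Dict.getD_insert_self]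
          rw [pv_loopA (PySem.Dict.ofList dw) tA (s1 :: rest') rts s0 _ _ depB hdep hlen]
          rw [pv_chainB (PySem.Dict.ofList dw) tA (s1 :: rest') rts depB 0 hlen]
          rw [add_zero]
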